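-- pv_equiv track=rewrite | github.com/phungthanhloan1996/ai-recon-agent | core/endpoint_registry.py | _merge_param_variants
-- ===== SOURCE A (Python) =====
-- from typing import Any, Dict, Iterable, List, Optional, Set
--
-- def _merge_param_variants(existing: Optional[Dict[str, List[str]]], incoming: Optional[Dict[str, List[str]]]) -> Dict[str, List[str]]:
--     merged: Dict[str, List[str]] = {}
--     for source in (existing or {}, incoming or {}):
--         for key, values in source.items():
--             current = list(merged.get(key) or [])
--             for value in values or []:
--                 if value not in current:
--                     current.append(value)
--             merged[key] = current
--     return merged
-- ===== SOURCE B (Python) =====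
-- def _merge_param_variants(existing, incoming):
--     # Relational pipeline: flatten both sources into one global (key, value) pair
--     # stream, dedup that stream order-preservingly in one shot, then distribute the
--     # surviving pairs into pre-allocated per-key buckets (first-seen key order).
--     items = list((existing or {}).items()) + list((incoming or {}).items())
--     pairs = dict.fromkeys((k, v) for k, vs in items for v in (vs or []))
--     buckets = {k: [] for k, _ in items}
--     for k, v in pairs:
--         buckets[k].append(v)
--     return buckets
-- ===== Notes on version B (the rewrite author's own statement) =====
-- stated objective: alternative
-- what changed: Replaces A's incremental dict build with per-value append-if-absent membership scans by a flat relational pipeline: flatten both dicts into one (key,value) pair stream, dedup that stream globally in one shot with dict.fromkeys, pre-allocate per-key buckets in first-seen key order, then distribute the surviving pairs into their buckets in a single pass.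
import Mathlib
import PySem

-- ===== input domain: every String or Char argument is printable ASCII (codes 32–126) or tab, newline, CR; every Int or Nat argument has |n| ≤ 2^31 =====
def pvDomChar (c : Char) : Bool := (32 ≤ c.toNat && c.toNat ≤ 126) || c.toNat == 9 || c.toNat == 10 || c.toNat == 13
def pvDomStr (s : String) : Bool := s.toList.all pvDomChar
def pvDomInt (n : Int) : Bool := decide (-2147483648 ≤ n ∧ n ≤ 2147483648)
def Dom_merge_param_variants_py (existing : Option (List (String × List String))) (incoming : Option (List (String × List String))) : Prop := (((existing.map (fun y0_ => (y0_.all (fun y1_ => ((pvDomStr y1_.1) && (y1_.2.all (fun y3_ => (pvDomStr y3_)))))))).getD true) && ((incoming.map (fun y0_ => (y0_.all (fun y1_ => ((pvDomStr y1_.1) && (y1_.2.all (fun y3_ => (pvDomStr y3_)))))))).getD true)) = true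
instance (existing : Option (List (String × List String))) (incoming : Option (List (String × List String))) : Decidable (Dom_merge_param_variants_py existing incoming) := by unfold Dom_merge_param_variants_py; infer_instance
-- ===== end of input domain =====

-- B replaces A's incremental dict build (per-value append-if-absent) by a flat relational
-- pipeline: flatten to a (key, value) pair stream, dedup it globally, then group by key.
-- Objective: alternative decomposition (not claimed faster).

-- ===== PORT A =====
-- one iteration of A's middle loop: current = list(merged.get(key) or []); append-if-absent each value; merged[key] = current
def pvMergeAStep (merged : PySem.Dict String (List String)) (kv : String × List String) : PySem.Dict String (List String) :=
  let current := kv.2.foldl (fun cur v => if cur.contains v then cur else cur ++ [v]) (merged.getD kv.1 [])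
  merged.insert kv.1 current

def merge_param_variants_py (existing : Option (List (String × List String))) (incoming : Option (List (String × List String))) : List (String × List String) :=
  -- for source in (existing or {}, incoming or {}): for key, values in source.items(): …
  let m1 := (existing.getD []).foldl pvMergeAStep PySem.Dict.empty
  let m2 := (incoming.getD []).foldl pvMergeAStep m1
  m2.items

-- ===== PORT B =====
def merge_param_variants_py_alt (existing : Option (List (String × List String))) (incoming : Option (List (String × List String))) : List (String × List String) :=
  -- items = list((existing or {}).items()) + list((incoming or {}).items())
  let items := existing.getD [] ++ incoming.getD []
  -- pairs = dict.fromkeys((k, v) for k, vs in items for v in (vs or []))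
  let pairs := PySem.List.dedup (items.flatMap (fun kv => kv.2.map (fun v => (kv.1, v))))
  -- buckets = {k: [] for k, _ in items}
  let buckets := items.foldl (fun d kv => d.insert kv.1 []) PySem.Dict.empty
  -- for k, v in pairs: buckets[k].append(v)   (k is always a key of buckets; modify with default [] is exact)
  let final := pairs.foldl (fun d p => d.modify p.1 [] (fun w => w ++ [p.2])) buckets
  final.items

-- ===== PRECONDITION & SPEC =====
def Spec_merge_param_variants_py (existing : Option (List (String × List String))) (incoming : Option (List (String × List String))) (out : List (String × List String)) : Prop := out = merge_param_variants_py_alt existing incoming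
instance (existing : Option (List (String × List String))) (incoming : Option (List (String × List String))) (out : List (String × List String)) : Decidable (Spec_merge_param_variants_py existing incoming out) := by unfold Spec_merge_param_variants_py; infer_instance

-- ===== CLAIM (what is proved, stated in full; the proofs are below) =====
def Claim_equal_merge_param_variants_py : Prop := ∀ (existing : Option (List (String × List String))) (incoming : Option (List (String × List String))), Dom_merge_param_variants_py existing incoming → Spec_merge_param_variants_py existing incoming (merge_param_variants_py existing incoming)

-- ===== LEMMAS AND PROOFS =====

-- getD of one A-step
theorem pvGetD_step (d : PySem.Dict String (List String)) (kv : String × List String) (k : String) :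
    (pvMergeAStep d kv).getD k [] =
      if k = kv.1 then kv.2.foldl (fun cur v => if cur.contains v then cur else cur ++ [v]) (d.getD kv.1 []) else d.getD k [] := by
  unfold pvMergeAStep
  rw [PySem.Dict.getD_insert]

-- getD of A's whole fold: the append-if-absent fold over all values collected for k
theorem pvGetD_fold (ps : List (String × List String)) (d : PySem.Dict String (List String)) (k : String) :
    (ps.foldl pvMergeAStep d).getD k [] =
      ((ps.filter (fun p => p.1 == k)).flatMap (fun p => p.2)).foldl
        (fun cur v => if cur.contains v then cur else cur ++ [v]) (d.getD k []) := by
  induction ps generalizing d with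
  | nil => rfl
  | cons q rest ih =>
    simp only [List.foldl_cons, ih, List.filter_cons]
    by_cases h : q.1 = k
    · simp only [h, beq_self_eq_true, if_pos, List.flatMap_cons, List.foldl_append, pvGetD_step]
    · have hb : (q.1 == k) = false := beq_eq_false_iff_ne.2 h
      simp only [hb, Bool.false_eq_true, if_false, pvGetD_step, if_neg (Ne.symm h)]

-- order-preserving dedup commutes with filter
theorem pvFilter_ofList {α : Type} [BEq α] [LawfulBEq α] (p : α → Bool) (l : List α) :
    (PySem.Set.ofList l).filter p = PySem.Set.ofList (l.filter p) := by
  induction l using List.reverseRecOn with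
  | nil => rfl
  | append_singleton xs x ih =>
    rw [PySem.Set.ofList_append_singleton, List.filter_append, PySem.Set.add_eq_ite]
    by_cases hx : x ∈ PySem.Set.ofList xs
    · have hx' : x ∈ xs := (PySem.Set.mem_ofList _ _).1 hx
      rw [if_pos hx, ih]
      by_cases hp : p x = true
      · have : x ∈ PySem.Set.ofList (xs.filter p) :=
          (PySem.Set.mem_ofList _ _).2 (List.mem_filter.2 ⟨hx', hp⟩)
        simp [hp, PySem.Set.ofList_append_singleton, PySem.Set.add_of_mem this]
      · simp only [Bool.not_eq_true] at hp
        simp [hp]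
    · rw [if_neg hx, List.filter_append, ih]
      by_cases hp : p x = true
      · have : x ∉ PySem.Set.ofList (xs.filter p) := fun hmem =>
          hx ((PySem.Set.mem_ofList _ _).2 (List.mem_filter.1 ((PySem.Set.mem_ofList _ _).1 hmem)).1)
        simp [hp, PySem.Set.ofList_append_singleton, PySem.Set.add_of_not_mem this]
      · simp only [Bool.not_eq_true] at hp
        simp [hp]

-- order-preserving dedup commutes with an injective map
theorem pvMap_ofList {α β : Type} [BEq α] [LawfulBEq α] [BEq β] [LawfulBEq β]
    (f : α → β) (hf : Function.Injective f) (l : List α) :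
    PySem.Set.ofList (l.map f) = (PySem.Set.ofList l).map f := by
  induction l using List.reverseRecOn with
  | nil => rfl
  | append_singleton xs x ih =>
    rw [List.map_append, List.map_singleton, PySem.Set.ofList_append_singleton,
      PySem.Set.ofList_append_singleton, PySem.Set.add_eq_ite, PySem.Set.add_eq_ite, ih]
    by_cases hx : x ∈ PySem.Set.ofList xs
    · rw [if_pos hx, if_pos (List.mem_map_of_mem hx)]
    · rw [if_neg hx, if_neg (fun hm => hx (by
        obtain ⟨y, hy, hyx⟩ := List.mem_map.1 hm
        exact hf hyx ▸ hy)), List.map_append, List.map_singleton]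

-- filtering the flattened pair stream by key k keeps exactly k's values, tagged with k
theorem pvFilter_flat (ps : List (String × List String)) (k : String) :
    (ps.flatMap (fun kv => kv.2.map (fun v => (kv.1, v)))).filter (fun p => p.1 == k) =
      ((ps.filter (fun p => p.1 == k)).flatMap (fun p => p.2)).map (fun v => (k, v)) := by
  induction ps with
  | nil => rfl
  | cons q rest ih =>
    simp only [List.flatMap_cons, List.filter_append, List.filter_cons, ih, List.filter_map]
    by_cases h : q.1 = k
    · subst h
      simp [List.flatMap_cons, Function.comp_def]
    · have hb : (q.1 == k) = false := beq_eq_false_iff_ne.2 h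
      simp [hb, Function.comp_def]

-- every bucket starts empty: the key-allocation fold only ever stores []
theorem pvGetD_buckets (ps : List (String × List String)) (d : PySem.Dict String (List String))
    (h : ∀ k', d.getD k' [] = ([] : List String)) (k : String) :
    (ps.foldl (fun d kv => d.insert kv.1 []) d).getD k [] = [] := by
  induction ps generalizing d with
  | nil => exact h k
  | cons q rest ih =>
    refine ih _ (fun k' => ?_)
    rw [PySem.Dict.getD_insert]
    split
    · rfl
    · exact h k'

-- the per-key value list of B equals A's per-key append-if-absent result
theorem pvPerKey (items : List (String × List String)) (k : String) :
    ((PySem.List.dedup (items.flatMap (fun kv => kv.2.map (fun v => (kv.1, v))))).filter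
        (fun p => p.1 == k)).map (fun p => p.2) =
      ((items.filter (fun p => p.1 == k)).flatMap (fun p => p.2)).foldl
        (fun cur v => if cur.contains v then cur else cur ++ [v]) [] := by
  have hinj : Function.Injective (fun v : String => (k, v)) := by
    intro a b h; exact congrArg Prod.snd h
  rw [PySem.List.dedup_eq_ofList, pvFilter_ofList, pvFilter_flat,
    pvMap_ofList _ hinj, List.map_map]
  rw [show ((fun p : String × String => p.2) ∘ (fun v : String => (k, v))) = id from rfl,
    List.map_id, PySem.Set.ofList_eq_foldl]
  rfl

-- ===== VERDICT (by name: the statement is the Claim_ definition above) =====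
theorem merge_param_variants_py_spec : Claim_equal_merge_param_variants_py := by
  intro existing incoming _
  show ((incoming.getD []).foldl pvMergeAStep ((existing.getD []).foldl pvMergeAStep PySem.Dict.empty)).items
      = ((PySem.List.dedup ((existing.getD [] ++ incoming.getD []).flatMap
            (fun kv => kv.2.map (fun v => (kv.1, v))))).foldl
          (fun d p => d.modify p.1 [] (fun w => w ++ [p.2]))
          ((existing.getD [] ++ incoming.getD []).foldl (fun d kv => d.insert kv.1 []) PySem.Dict.empty)).items
  rw [← List.foldl_append]
  set items := existing.getD [] ++ incoming.getD [] with hitems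
  set D := items.foldl pvMergeAStep PySem.Dict.empty with hD
  set P := PySem.List.dedup (items.flatMap (fun kv => kv.2.map (fun v => (kv.1, v)))) with hP
  set Bk := items.foldl (fun d kv => d.insert kv.1 ([] : List String)) PySem.Dict.empty with hBk
  set F := P.foldl (fun d p => d.modify p.1 [] (fun w => w ++ [p.2])) Bk with hF
  -- A side: keys and per-key values of the merged dict
  have hnd : D.keys.Nodup := PySem.Dict.nodup_keys_foldl_insert_key items (fun kv => kv.1)
    (fun d kv => kv.2.foldl (fun cur v => if cur.contains v then cur else cur ++ [v]) (d.getD kv.1 []))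
    PySem.Dict.empty (by simp)
  have hkeys : D.keys = PySem.List.dedup (items.map (fun kv => kv.1)) := by
    have h1 : D.keys = PySem.Set.update (PySem.Dict.empty : PySem.Dict String (List String)).keys
        (items.map (fun kv => kv.1)) := PySem.Dict.keys_foldl_insert_key items (fun kv => kv.1)
      (fun d kv => kv.2.foldl (fun cur v => if cur.contains v then cur else cur ++ [v]) (d.getD kv.1 []))
      PySem.Dict.empty
    rw [h1, PySem.List.dedup_eq_ofList]
    rfl
  -- B side: the bucket dict has the same keys and the distributed per-key values
  have hndB : Bk.keys.Nodup := PySem.Dict.nodup_keys_foldl_insert_key items (fun kv => kv.1)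
    (fun _ _ => []) PySem.Dict.empty (by simp)
  have hkB : Bk.keys = PySem.List.dedup (items.map (fun kv => kv.1)) := by
    have h1 : Bk.keys = PySem.Set.update (PySem.Dict.empty : PySem.Dict String (List String)).keys
        (items.map (fun kv => kv.1)) := PySem.Dict.keys_foldl_insert_key items (fun kv => kv.1)
      (fun _ _ => []) PySem.Dict.empty
    rw [h1, PySem.List.dedup_eq_ofList]
    rfl
  have hndF : F.keys.Nodup := PySem.Dict.nodup_keys_foldl_modify_key P (fun p => p.1) []
    (fun _ p => fun w => w ++ [p.2]) Bk hndB
  have hkF : F.keys = Bk.keys := by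
    have h1 : F.keys = PySem.Set.update Bk.keys (P.map (fun p => p.1)) :=
      PySem.Dict.keys_foldl_modify_key P (fun p => p.1) [] (fun _ p => fun w => w ++ [p.2]) Bk
    rw [h1, PySem.Set.update_eq_append_filter]
    have hnilf : ((PySem.Set.ofList (P.map (fun p => p.1))).filter
        (fun y => !(PySem.Set.contains Bk.keys y))) = [] := by
      apply List.filter_eq_nil_iff.2
      intro y hy
      have hy' : y ∈ P.map (fun p => p.1) := (PySem.Set.mem_ofList _ _).1 hy
      obtain ⟨p, hp, rfl⟩ := List.mem_map.1 hy'
      have hpf : p ∈ items.flatMap (fun kv => kv.2.map (fun v => (kv.1, v))) :=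
        (PySem.List.mem_dedup _ _).1 (hP ▸ hp)
      obtain ⟨kv, hkv, hpm⟩ := List.mem_flatMap.1 hpf
      obtain ⟨v, _, rfl⟩ := List.mem_map.1 hpm
      have hmemk : kv.1 ∈ Bk.keys := by
        rw [hkB]
        exact (PySem.List.mem_dedup _ _).2 (List.mem_map_of_mem hkv)
      simpa using hmemk
    rw [hnilf, List.append_nil]
  have hb0 : ∀ k, Bk.getD k [] = [] := by
    intro k
    rw [hBk]
    exact pvGetD_buckets items PySem.Dict.empty (fun _ => rfl) k
  have hgF : ∀ k, F.getD k [] = (P.filter (fun p => p.1 == k)).map (fun p => p.2) := by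
    intro k
    calc F.getD k [] = Bk.getD k [] ++ (P.filter (fun p => p.1 == k)).map (fun p => p.2) :=
          PySem.Dict.getD_foldl_modify_append P Bk k
      _ = (P.filter (fun p => p.1 == k)).map (fun p => p.2) := by rw [hb0 k, List.nil_append]
  rw [PySem.Dict.items_eq_map_keys D hnd [], PySem.Dict.items_eq_map_keys F hndF [], hkF, hkB, hkeys]
  apply List.map_congr_left
  intro k _
  have hg : D.getD k [] = ((items.filter (fun p => p.1 == k)).flatMap (fun p => p.2)).foldl
      (fun cur v => if cur.contains v then cur else cur ++ [v]) [] := by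
    rw [hD, pvGetD_fold]
    rfl
  exact congrArg (fun w => (k, w)) ((hg.trans (pvPerKey items k).symm).trans (hgF k).symm)
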